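-- pv_equiv track=rewrite | github.com/howarth/presenters | presenter/common.py | stim_ind
-- ===== SOURCE A (Python) =====
-- def stim_ind(stim_seq):
--     next_unique = 0;
--     stim_to_ind = dict();
--     ind_seq = len(stim_seq)*[-1]
--
--     for i,c in enumerate(stim_seq):
--         if c in stim_to_ind:
--             ind_seq[i] = stim_to_ind[c]
--         else:
--             stim_to_ind[c] = next_unique
--             ind_seq[i] = next_unique
--             next_unique += 1
--
--     return stim_to_ind, ind_seq
-- ===== SOURCE B (Python) =====
-- def stim_ind(stim_seq):
--     # three-step pipeline: ordered dedup -> enumerate into an index table -> map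
--     uniques = list(dict.fromkeys(stim_seq))
--     stim_to_ind = {c: i for i, c in enumerate(uniques)}
--     ind_seq = [stim_to_ind[c] for c in stim_seq]
--     return stim_to_ind, ind_seq
-- ===== Notes on version B (the rewrite author's own statement) =====
-- stated objective: simpler
-- what changed: Replaces the single interleaved loop with a running counter and in/else branch by a three-step pipeline: ordered dedup (dict.fromkeys), enumerate the uniques into the index table, then map the sequence through the table.
import Mathlib
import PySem

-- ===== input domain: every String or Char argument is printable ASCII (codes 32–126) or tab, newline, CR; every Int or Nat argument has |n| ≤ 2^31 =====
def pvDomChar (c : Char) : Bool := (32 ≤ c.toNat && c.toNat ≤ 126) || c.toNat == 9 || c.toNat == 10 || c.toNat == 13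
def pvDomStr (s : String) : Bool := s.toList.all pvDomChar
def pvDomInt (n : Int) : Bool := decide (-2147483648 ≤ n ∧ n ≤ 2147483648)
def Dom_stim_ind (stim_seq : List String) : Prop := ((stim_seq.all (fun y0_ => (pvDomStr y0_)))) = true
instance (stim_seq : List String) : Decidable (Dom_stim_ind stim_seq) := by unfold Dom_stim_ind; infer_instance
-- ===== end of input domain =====

-- B replaces the interleaved counter loop by a three-step pipeline (dedup -> enumerate -> map); objective: simpler.


-- ===== PORT A =====
-- A writes ind_seq[i] for i = 0,1,2,… into a preallocated list, i.e. the result list is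
-- produced left-to-right; the fold appends each written value, the same values in the same order.
def stim_ind (stim_seq : List String) : (List (String × Int)) × List Int :=
  let st := stim_seq.foldl
    (fun (st : Int × PySem.Dict String Int × List Int) c =>
      match PySem.Dict.get? st.2.1 c with      -- 'if c in stim_to_ind:' + 'stim_to_ind[c]'
      | some v => (st.1, st.2.1, st.2.2 ++ [v])
      | none   => (st.1 + 1, PySem.Dict.insert st.2.1 c st.1, st.2.2 ++ [st.1]))
    (0, PySem.Dict.empty, [])
  (st.2.1.items, st.2.2)

-- ===== PORT B =====
def stim_ind_alt (stim_seq : List String) : (List (String × Int)) × List Int :=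
  let uniques := PySem.List.dedup stim_seq                    -- list(dict.fromkeys(stim_seq))
  let stim_to_ind := (uniques.zipIdx).foldl                   -- {c: i for i, c in enumerate(uniques)}
    (fun (d : PySem.Dict String Int) p => PySem.Dict.insert d p.1 (p.2 : Int)) PySem.Dict.empty
  let ind_seq := stim_seq.map (fun c => PySem.Dict.getD stim_to_ind c 0)  -- stim_to_ind[c]; key always present
  (stim_to_ind.items, ind_seq)

-- ===== PRECONDITION & SPEC =====
def Spec_stim_ind (stim_seq : List String) (out : (List (String × Int)) × List Int) : Prop := out = stim_ind_alt stim_seq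
instance (stim_seq : List String) (out : (List (String × Int)) × List Int) : Decidable (Spec_stim_ind stim_seq out) := by unfold Spec_stim_ind; infer_instance

-- ===== CLAIM (what is proved, stated in full; the proofs are below) =====
def Claim_equal_stim_ind : Prop := ∀ (stim_seq : List String), Dom_stim_ind stim_seq → Spec_stim_ind stim_seq (stim_ind stim_seq)

-- ===== LEMMAS AND PROOFS =====

-- the association list {seen[0] ↦ k, seen[1] ↦ k+1, …}
def itemsFrom (k : Int) : List String → List (String × Int)
  | [] => []
  | a :: l => (a, k) :: itemsFrom (k + 1) l

theorem itemsFrom_append (k : Int) (l1 l2 : List String) :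
    itemsFrom k (l1 ++ l2) = itemsFrom k l1 ++ itemsFrom (k + l1.length) l2 := by
  induction l1 generalizing k with
  | nil => simp [itemsFrom]
  | cons a l ih => simp [itemsFrom, ih (k + 1)]; ring_nf

theorem get?_itemsFrom_eq_none_iff (k : Int) (seen : List String) (c : String) :
    PySem.Dict.get? ⟨itemsFrom k seen⟩ c = none ↔ c ∉ seen := by
  induction seen generalizing k with
  | nil => simp [itemsFrom, PySem.Dict.get?]
  | cons a l ih =>
    by_cases h : a = c
    · subst h; simp [itemsFrom, PySem.Dict.get?]
    · simpa [itemsFrom, PySem.Dict.get?, List.find?, h, Ne.symm h] using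
        (by simpa [PySem.Dict.get?] using ih (k + 1))

theorem contains_eq_false_of_not_mem (k : Int) (seen : List String) (c : String)
    (h : c ∉ seen) : PySem.Dict.contains ⟨itemsFrom k seen⟩ c = false := by
  have hn := (get?_itemsFrom_eq_none_iff k seen c).2 h
  simp only [PySem.Dict.get?, Option.map_eq_none_iff, List.find?_eq_none] at hn
  simp only [PySem.Dict.contains, List.any_eq_false]
  exact hn

theorem get?_itemsFrom_append_of_mem (k : Int) (seen t : List String) (c : String)
    (h : c ∈ seen) :
    PySem.Dict.get? ⟨itemsFrom k (seen ++ t)⟩ c = PySem.Dict.get? ⟨itemsFrom k seen⟩ c := by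
  have hs : PySem.Dict.get? ⟨itemsFrom k seen⟩ c ≠ none := by
    rw [Ne, get?_itemsFrom_eq_none_iff]; simpa using h
  rcases ho : PySem.Dict.get? ⟨itemsFrom k seen⟩ c with _ | v
  · exact absurd ho hs
  · simp only [PySem.Dict.get?, Option.map_eq_some_iff] at ho ⊢
    obtain ⟨p, hp, hpv⟩ := ho
    exact ⟨p, by rw [itemsFrom_append, List.find?_append, hp]; rfl, hpv⟩

-- the final set of uniques produced by continuing from `seen`
def uniqFrom (seen : List String) (xs : List String) : List String :=
  xs.foldl PySem.Set.add seen

theorem uniqFrom_prefix (seen xs : List String) : ∃ t, uniqFrom seen xs = seen ++ t := by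
  induction xs generalizing seen with
  | nil => exact ⟨[], by simp [uniqFrom]⟩
  | cons c xs ih =>
    by_cases h : c ∈ seen
    · obtain ⟨t, ht⟩ := ih seen
      exact ⟨t, by simpa [uniqFrom, PySem.Set.add, List.contains_eq_mem, h] using ht⟩
    · obtain ⟨t, ht⟩ := ih (seen ++ [c])
      exact ⟨c :: t, by simpa [uniqFrom, PySem.Set.add, List.contains_eq_mem, h] using ht⟩

-- the invariant of A's loop: starting from the table of `seen`, the loop extends the table to
-- the table of all uniques and appends the final-table lookup of every element of xs.
theorem loopA (xs : List String) : ∀ (seen : List String) (acc : List Int), seen.Nodup →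
    xs.foldl
      (fun (st : Int × PySem.Dict String Int × List Int) c =>
        match PySem.Dict.get? st.2.1 c with
        | some v => (st.1, st.2.1, st.2.2 ++ [v])
        | none   => (st.1 + 1, PySem.Dict.insert st.2.1 c st.1, st.2.2 ++ [st.1]))
      ((seen.length : Int), ⟨itemsFrom 0 seen⟩, acc)
    = (((uniqFrom seen xs).length : Int), ⟨itemsFrom 0 (uniqFrom seen xs)⟩,
       acc ++ xs.map (fun c => PySem.Dict.getD ⟨itemsFrom 0 (uniqFrom seen xs)⟩ c 0)) := by
  induction xs with
  | nil => intro seen acc _; simp [uniqFrom]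
  | cons c xs ih =>
    intro seen acc hnd
    by_cases hc : c ∈ seen
    · -- lookup hits: dict and counter unchanged
      have hsome : PySem.Dict.get? ⟨itemsFrom 0 seen⟩ c ≠ none := by
        rw [Ne, get?_itemsFrom_eq_none_iff]; simpa using hc
      rcases ho : PySem.Dict.get? ⟨itemsFrom 0 seen⟩ c with _ | v
      · exact absurd ho hsome
      have hadd : PySem.Set.add seen c = seen := by
        simp [PySem.Set.add, List.contains_eq_mem, hc]
      have hu : uniqFrom seen (c :: xs) = uniqFrom seen xs := by
        simp [uniqFrom, List.foldl_cons, hadd]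
      have hget : PySem.Dict.getD ⟨itemsFrom 0 (uniqFrom seen xs)⟩ c 0 = v := by
        obtain ⟨t, ht⟩ := uniqFrom_prefix seen xs
        rw [PySem.Dict.getD, ht, get?_itemsFrom_append_of_mem 0 seen t c hc, ho]; rfl
      simp only [List.foldl_cons, ho]
      rw [ih seen (acc ++ [v]) hnd, hu]
      simp [hget]
    · -- lookup misses: insert fresh key at index seen.length
      have hnone : PySem.Dict.get? ⟨itemsFrom 0 seen⟩ c = none :=
        (get?_itemsFrom_eq_none_iff 0 seen c).2 hc
      have hcont : PySem.Dict.contains ⟨itemsFrom 0 seen⟩ c = false :=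
        contains_eq_false_of_not_mem 0 seen c hc
      have hins : PySem.Dict.insert ⟨itemsFrom 0 seen⟩ c (seen.length : Int)
          = ⟨itemsFrom 0 (seen ++ [c])⟩ := by
        simp [PySem.Dict.insert, hcont, itemsFrom_append, itemsFrom]
      have hnd' : (seen ++ [c]).Nodup := by
        simp only [List.nodup_append, List.nodup_cons, List.not_mem_nil, not_false_iff,
          List.nodup_nil, and_true]
        exact ⟨hnd, trivial, fun a ha b hb => by
          simp only [List.mem_singleton] at hb
          exact fun he => hc ((hb ▸ he) ▸ ha)⟩
      have hu : uniqFrom seen (c :: xs) = uniqFrom (seen ++ [c]) xs := by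
        simp [uniqFrom, List.foldl_cons, PySem.Set.add, List.contains_eq_mem, hc]
      have hget : PySem.Dict.getD ⟨itemsFrom 0 (uniqFrom (seen ++ [c]) xs)⟩ c 0
          = (seen.length : Int) := by
        obtain ⟨t, ht⟩ := uniqFrom_prefix (seen ++ [c]) xs
        rw [PySem.Dict.getD, ht, get?_itemsFrom_append_of_mem 0 (seen ++ [c]) t c (by simp),
          itemsFrom_append]
        have hfind : List.find? (fun p => p.1 == c) (itemsFrom 0 seen) = none := by
          simpa [PySem.Dict.get?, Option.map_eq_none_iff] using hnone
        simp [PySem.Dict.get?, List.find?_append, hfind, itemsFrom]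
      have hlen : ((seen ++ [c]).length : Int) = (seen.length : Int) + 1 := by
        simp
      simp only [List.foldl_cons, hnone]
      rw [hins, ← hlen, ih (seen ++ [c]) (acc ++ [(seen.length : Int)]) hnd', hu]
      simp [hget]

-- the dict comprehension over zipIdx of a fresh nodup list appends exactly itemsFrom
theorem foldB (U : List String) : ∀ (d : PySem.Dict String Int) (n : Nat), U.Nodup →
    (∀ c ∈ U, PySem.Dict.contains d c = false) →
    (U.zipIdx n).foldl (fun (d : PySem.Dict String Int) p => PySem.Dict.insert d p.1 (p.2 : Int)) d
      = ⟨d.items ++ itemsFrom (n : Int) U⟩ := by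
  induction U with
  | nil => intro d n _ _; simp [itemsFrom]
  | cons a U ih =>
    intro d n hnd hfresh
    have hca : PySem.Dict.contains d a = false := hfresh a (by simp)
    have hins : PySem.Dict.insert d a (n : Int) = ⟨d.items ++ [(a, (n : Int))]⟩ := by
      simp [PySem.Dict.insert, hca]
    have hfresh' : ∀ c ∈ U, PySem.Dict.contains (⟨d.items ++ [(a, (n : Int))]⟩ : PySem.Dict String Int) c = false := by
      intro c hcU
      have h1 : PySem.Dict.contains d c = false := hfresh c (by simp [hcU])
      have hne : a ≠ c := fun h => (List.nodup_cons.1 hnd).1 (h ▸ hcU)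
      simp only [PySem.Dict.contains, List.any_append, Bool.or_eq_false_iff, List.any_eq_false] at h1 ⊢
      exact ⟨h1, by intro p hp; simp only [List.mem_singleton] at hp; simp [hp, hne]⟩
    have := ih ⟨d.items ++ [(a, (n : Int))]⟩ (n + 1) (List.nodup_cons.1 hnd).2 hfresh'
    simp only [List.zipIdx_cons, List.foldl_cons, hins, this, itemsFrom]
    simp

theorem dedup_eq_uniqFrom (xs : List String) : PySem.List.dedup xs = uniqFrom [] xs := rfl

-- ===== VERDICT (by name: the statement is the Claim_ definition above) =====
theorem stim_ind_spec : Claim_equal_stim_ind := by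
  intro xs _
  have hA := loopA xs [] [] List.nodup_nil
  have hnd : (uniqFrom [] xs).Nodup := PySem.Set.nodup_ofList xs
  have hB := foldB (uniqFrom [] xs) PySem.Dict.empty 0 hnd (fun c _ => rfl)
  simp only [List.length_nil, Nat.cast_zero, itemsFrom, List.nil_append] at hA
  simp only [Nat.cast_zero, PySem.Dict.empty, List.nil_append] at hB
  unfold Spec_stim_ind stim_ind stim_ind_alt
  rw [dedup_eq_uniqFrom]
  simp only [PySem.Dict.empty, hA, hB]
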